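-- pv_equiv track=rewrite | github.com/Hoshi-Third/yukinao | ito_chain.py | processed_food
-- ===== SOURCE A (Python) =====
-- import itertools
-- import itertools
--
-- def count_word(wordlist,tup): #tupは(a,a,a,b,c)などの形
--   word_count = []
--   for j in wordlist:
--     count = 0
--     for i in range(0,len(tup)):
--       if j == tup[i]:
--         count += 1
--     word_count.append(count)
--   return tuple(word_count) #返り値は(3,1,1)などの形
--
-- def processed_food(num,value): #たれ、極、麻婆豆腐の3つ
--   ans = []
--   all = itertools.combinations_with_replacement('abc', num) #abcはあくまで種類の数
--   for x in all:
--     item_num = count_word('abc',x)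
--     if 398 * item_num[0] + 280 * item_num[1] + 350 * item_num[2] == value:
--       ans.append(item_num)
--   return ans #返り値は2重リスト
-- ===== SOURCE B (Python) =====
-- def processed_food(num, value):
--     # Direct O(num^2) enumeration: a,b descending with c determined, matching
--     # the lexicographic order of combinations_with_replacement('abc', num).
--     ans = []
--     for a in range(num, -1, -1):
--         for b in range(num - a, -1, -1):
--             c = num - a - b
--             if 398 * a + 280 * b + 350 * c == value:
--                 ans.append((a, b, c))
--     return ans
-- ===== Notes on version B (the rewrite author's own statement) =====
-- stated objective: faster
-- what changed: Replaces generation of all C(num+2,2) letter-combinations plus an O(num) count of each with a direct double loop over the counts (a,b) with c=num-a-b determined, testing the price equation in O(1).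
import Mathlib
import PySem

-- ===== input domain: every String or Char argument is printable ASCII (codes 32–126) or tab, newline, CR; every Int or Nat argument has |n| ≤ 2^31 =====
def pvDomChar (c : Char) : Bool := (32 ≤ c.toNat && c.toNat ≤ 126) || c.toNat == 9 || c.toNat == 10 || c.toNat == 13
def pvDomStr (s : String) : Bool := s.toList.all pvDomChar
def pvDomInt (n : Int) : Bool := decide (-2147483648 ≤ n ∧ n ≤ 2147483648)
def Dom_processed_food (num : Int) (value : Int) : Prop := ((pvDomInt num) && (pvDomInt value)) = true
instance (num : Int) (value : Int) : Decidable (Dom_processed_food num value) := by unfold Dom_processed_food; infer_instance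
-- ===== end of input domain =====

-- B replaces A's enumeration of all letter-combinations (each re-counted in O(num))
-- by a direct double loop over the counts (a,b) with c = num-a-b; A = B proved for num ≥ 0.

-- ===== PORT A =====
-- itertools.combinations_with_replacement('abc', r) ported by hand: the standard
-- lexicographic recursion producing exactly itertools' output sequence (exact here).
def cwr (pool : List Char) (r : Nat) : List (List Char) :=
  match r, pool with
  | 0, _ => [[]]
  | Nat.succ r', x :: xs => (cwr (x :: xs) r').map (fun t => x :: t) ++ cwr xs (Nat.succ r')
  | Nat.succ _, [] => []
termination_by (r, pool.length)

-- count loop of A: for i in range(0, len(tup)): if j == tup[i] (index always in range,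
-- so pyGetD's dummy default is never used — exact)
def count_one (tup : List Char) (j : Char) : Int :=
  (PySem.List.pyRange 0 (tup.length : Int) 1).foldl
    (fun count i => if j = PySem.List.pyGetD tup i ' ' then count + 1 else count) 0

def count_word (wordlist : List Char) (tup : List Char) : List Int :=
  wordlist.foldl (fun acc j => acc ++ [count_one tup j]) []

-- num.toNat: Pre_ requires 0 ≤ num (Python raises ValueError for negative num).
-- t always has length 3, so pyGetD's default 0 is never used — exact.
def processed_food (num : Int) (value : Int) : List (List Int) :=
  (cwr ['a', 'b', 'c'] num.toNat).foldl
    (fun ans x =>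
      let t := count_word ['a', 'b', 'c'] x
      if 398 * PySem.List.pyGetD t 0 0 + 280 * PySem.List.pyGetD t 1 0 +
          350 * PySem.List.pyGetD t 2 0 == value
      then ans ++ [t] else ans) []

-- ===== PORT B =====
def processed_food_alt (num : Int) (value : Int) : List (List Int) :=
  (PySem.List.pyRange num (-1) (-1)).foldl (fun ans a =>
    (PySem.List.pyRange (num - a) (-1) (-1)).foldl (fun ans b =>
      let c := num - a - b
      if 398 * a + 280 * b + 350 * c == value then ans ++ [[a, b, c]] else ans) ans) []

-- ===== PRECONDITION & SPEC =====
-- A raises ValueError for num < 0 (negative r in combinations_with_replacement); total otherwise.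
def Pre_processed_food (num : Int) (value : Int) : Prop := 0 ≤ num
instance (num : Int) (value : Int) : Decidable (Pre_processed_food num value) := by
  unfold Pre_processed_food; infer_instance
def pvWitness_processed_food : Int × Int := (2, 796)

def Spec_processed_food (num : Int) (value : Int) (out : List (List Int)) : Prop :=
  out = processed_food_alt num value
instance (num : Int) (value : Int) (out : List (List Int)) : Decidable (Spec_processed_food num value out) := by
  unfold Spec_processed_food; infer_instance

-- ===== CLAIM (what is proved, stated in full; the proofs are below) =====
def Claim_equal_processed_food : Prop := ∀ (num : Int) (value : Int),
  Dom_processed_food num value → Pre_processed_food num value →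
  Spec_processed_food num value (processed_food num value)

-- ===== LEMMAS AND PROOFS =====

-- count_one is the occurrence count
theorem count_one_eq (tup : List Char) (j : Char) :
    count_one tup j = (tup.count j : Int) := by
  unfold count_one
  rw [PySem.List.foldl_pyRange_zero_pyGetD' tup ' ' (fun count c => if j = c then count + 1 else count) 0]
  rw [show (fun (count : Int) (c : Char) => if j = c then count + 1 else count)
        = (fun count c => if (fun c => c == j) c = true then count + 1 else count) by
      funext count c
      by_cases h : j = c
      · subst h; simp
      · have h2 : c ≠ j := fun hh => h hh.symm
        simp [h, h2]]
  rw [PySem.List.foldl_count_if (fun c => c == j) tup 0]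
  rw [List.count_eq_countP]
  omega

theorem count_word_eq (x : List Char) :
    count_word ['a', 'b', 'c'] x = [(x.count 'a' : Int), (x.count 'b' : Int), (x.count 'c' : Int)] := by
  simp [count_word, List.foldl, count_one_eq]

-- the triple list both programs filter, indexed the Nat way (a = n-i, b = i-j, c = j)
def T3 (n : Nat) : List (List Int) :=
  (List.range (n + 1)).flatMap (fun i =>
    (List.range (i + 1)).map (fun j => [((n - i : Nat) : Int), ((i - j : Nat) : Int), (j : Int)]))

def bumpA (t : List Int) : List Int := [t.getD 0 0 + 1, t.getD 1 0, t.getD 2 0]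
def bumpB (t : List Int) : List Int := [t.getD 0 0, t.getD 1 0 + 1, t.getD 2 0]

theorem cw_cons_a (x : List Char) :
    count_word ['a', 'b', 'c'] ('a' :: x) = bumpA (count_word ['a', 'b', 'c'] x) := by
  simp [count_word_eq, bumpA]
theorem cw_cons_b (x : List Char) :
    count_word ['a', 'b', 'c'] ('b' :: x) = bumpB (count_word ['a', 'b', 'c'] x) := by
  simp [count_word_eq, bumpB]

theorem cwr_c (n : Nat) : cwr ['c'] n = [List.replicate n 'c'] := by
  induction n with
  | zero => simp [cwr]
  | succ m ih => rw [cwr]; simp [ih, cwr, List.replicate_succ]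

theorem map_cw_cwr_bc (n : Nat) :
    (cwr ['b', 'c'] n).map (count_word ['a', 'b', 'c']) =
      (List.range (n + 1)).map (fun j => [0, ((n - j : Nat) : Int), (j : Int)]) := by
  induction n with
  | zero => simp [cwr, count_word_eq]
  | succ m ih =>
    rw [cwr]
    rw [List.map_append, List.map_map]
    rw [show (count_word ['a', 'b', 'c'] ∘ fun t => 'b' :: t)
          = (bumpB ∘ count_word ['a', 'b', 'c']) by funext t; simp [cw_cons_b]]
    rw [← List.map_map, ih, cwr_c, List.map_map]
    rw [show List.range (m + 1 + 1) = List.range (m + 1) ++ [m + 1] from List.range_succ]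
    rw [List.map_append]
    congr 1
    · apply List.map_congr_left
      intro j hj
      simp only [List.mem_range] at hj
      have h : m + 1 - j = (m - j) + 1 := by omega
      simp [bumpB, h]
    · simp [count_word_eq, List.count_replicate]

theorem map_cw_cwr_abc (n : Nat) :
    (cwr ['a', 'b', 'c'] n).map (count_word ['a', 'b', 'c']) = T3 n := by
  induction n with
  | zero => simp [cwr, count_word_eq, T3]
  | succ m ih =>
    rw [cwr]
    rw [List.map_append, List.map_map]
    rw [show (count_word ['a', 'b', 'c'] ∘ fun t => 'a' :: t)
          = (bumpA ∘ count_word ['a', 'b', 'c']) by funext t; simp [cw_cons_a]]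
    rw [← List.map_map, ih, map_cw_cwr_bc]
    unfold T3
    rw [show List.range (m + 1 + 1) = List.range (m + 1) ++ [m + 1] from List.range_succ]
    rw [List.flatMap_append, List.map_flatMap]
    congr 1
    · apply List.flatMap_congr
      intro x hx
      simp only [List.mem_range] at hx
      rw [List.map_map]
      apply List.map_congr_left
      intro j hj
      have h : m + 1 - x = (m - x) + 1 := by omega
      simp [bumpA, h]
    · simp
      conv_rhs => rw [List.range_succ, List.map_append]
      simp

-- filter form of A's result
theorem A_eq_filter (num value : Int) (h : 0 ≤ num) :
    processed_food num value =
      (T3 num.toNat).filter (fun t =>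
        398 * PySem.List.pyGetD t 0 0 + 280 * PySem.List.pyGetD t 1 0 +
          350 * PySem.List.pyGetD t 2 0 == value) := by
  unfold processed_food
  rw [PySem.List.foldl_append_if
        (fun x => 398 * PySem.List.pyGetD (count_word ['a','b','c'] x) 0 0 +
            280 * PySem.List.pyGetD (count_word ['a','b','c'] x) 1 0 +
            350 * PySem.List.pyGetD (count_word ['a','b','c'] x) 2 0 == value)
        (fun x => count_word ['a','b','c'] x)]
  rw [show (fun x => 398 * PySem.List.pyGetD (count_word ['a','b','c'] x) 0 0 +
            280 * PySem.List.pyGetD (count_word ['a','b','c'] x) 1 0 +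
            350 * PySem.List.pyGetD (count_word ['a','b','c'] x) 2 0 == value)
        = ((fun t => 398 * PySem.List.pyGetD t 0 0 + 280 * PySem.List.pyGetD t 1 0 +
            350 * PySem.List.pyGetD t 2 0 == value) ∘ (fun x => count_word ['a','b','c'] x)) from rfl]
  rw [← List.filter_map, map_cw_cwr_abc]
  simp

-- filter form of B's result
theorem B_eq_filter (num value : Int) (h : 0 ≤ num) :
    processed_food_alt num value =
      (T3 num.toNat).filter (fun t =>
        398 * PySem.List.pyGetD t 0 0 + 280 * PySem.List.pyGetD t 1 0 +
          350 * PySem.List.pyGetD t 2 0 == value) := by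
  unfold processed_food_alt
  -- inner loop = filter+map, outer loop = flatMap
  rw [show (fun (ans : List (List Int)) (a : Int) =>
        (PySem.List.pyRange (num - a) (-1) (-1)).foldl (fun ans b =>
          let c := num - a - b
          if 398 * a + 280 * b + 350 * c == value then ans ++ [[a, b, c]] else ans) ans)
      = (fun ans a => ans ++
          (((PySem.List.pyRange (num - a) (-1) (-1)).filter
              (fun b => 398 * a + 280 * b + 350 * (num - a - b) == value)).map
            (fun b => [a, b, num - a - b]))) by
    funext ans a
    exact PySem.List.foldl_append_if
      (fun b => 398 * a + 280 * b + 350 * (num - a - b) == value)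
      (fun b => [a, b, num - a - b]) _ ans]
  rw [PySem.List.foldl_append_eq_flatMap]
  -- push the filter outside
  rw [show (fun (a : Int) =>
        (((PySem.List.pyRange (num - a) (-1) (-1)).filter
            (fun b => 398 * a + 280 * b + 350 * (num - a - b) == value)).map
          (fun b => [a, b, num - a - b])))
      = (fun a => ((PySem.List.pyRange (num - a) (-1) (-1)).map
            (fun b => [a, b, num - a - b])).filter (fun t =>
          398 * PySem.List.pyGetD t 0 0 + 280 * PySem.List.pyGetD t 1 0 +
            350 * PySem.List.pyGetD t 2 0 == value)) by
    funext a
    rw [List.filter_map]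
    congr 1]
  rw [← List.filter_flatMap, List.nil_append]
  obtain ⟨n, rfl⟩ : ∃ n : Nat, num = (n : Int) := ⟨num.toNat, by omega⟩
  rw [Int.toNat_natCast]
  congr 1
  -- the unfiltered triple list is T3
  rw [PySem.List.pyRange_neg_one, List.flatMap_map,
      show ((n : Int) - (-1)).toNat = n + 1 by omega]
  unfold T3
  apply List.flatMap_congr
  intro k hk
  simp only [List.mem_range] at hk
  rw [show (n : Int) - ((n : Int) - (k : Nat)) = ((k : Nat) : Int) by ring,
      PySem.List.pyRange_neg_one,
      show (((k : Nat) : Int) - (-1)).toNat = k + 1 by omega,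
      List.map_map]
  apply List.map_congr_left
  intro j hj
  simp only [List.mem_range] at hj
  simp only [Function.comp]
  have h1 : ((n - k : Nat) : Int) = (n : Int) - (k : Nat) := by omega
  have h2 : ((k - j : Nat) : Int) = ((k : Nat) : Int) - (j : Nat) := by omega
  have h3 : ((k : Nat) : Int) - (((k : Nat) : Int) - (j : Nat)) = ((j : Nat) : Int) := by ring
  rw [h1, h2, h3]

-- ===== VERDICT (by name: the statement is the Claim_ definition above) =====
theorem processed_food_spec : Claim_equal_processed_food := by
  intro num value _ hpre
  unfold Spec_processed_food
  rw [A_eq_filter num value hpre, B_eq_filter num value hpre]
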